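-- pv_equiv track=rewrite | github.com/umervc/discrete-event-simulation-manufacturing | Simulation_Exercise4_final.py | valid_options
-- ===== SOURCE A (Python) =====
-- import itertools
--
-- def valid_options(budget):
--     resource_dict = {"design" : 40000 ,"assembly" : 10000,"curing" : 10000,"inspection" :10000 ,"shipping" : 10000}
--
--     limit = int(budget/10000)
--     combinations = list(itertools.product(range(limit+1), repeat=5))
--     costs = find_cost(combinations,resource_dict)
--     valid_options = [comb for comb, cost in zip(combinations, costs) if cost == budget]
--     valid_options = [[x + 1 for x in comb] for comb in valid_options]
--     #what will be fed in for the capacity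
--     return valid_options
--
-- def find_cost(combination,resource_dict):
--     costs = list(resource_dict.values())
--     cost = [sum((tuple(c * m for c, m in zip(comb, costs)))) for comb in combination]
--     return cost
-- ===== SOURCE B (Python) =====
-- def valid_options(budget):
--     limit = int(budget/10000)
--     if limit < 0 or budget % 10000 != 0:
--         return []
--     L = budget // 10000
--     out = []
--     for a in range(limit + 1):
--         for b in range(limit + 1):
--             for c in range(limit + 1):
--                 for d in range(limit + 1):
--                     e = L - 4 * a - b - c - d
--                     if 0 <= e <= limit:
--                         out.append([a + 1, b + 1, c + 1, d + 1, e + 1])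
--     return out
-- ===== Notes on version B (the rewrite author's own statement) =====
-- stated objective: faster
-- what changed: Instead of enumerating all (limit+1)^5 five-tuples and summing each one's cost, B iterates only the first four levels and solves the linear cost equation for the fifth (after an upfront divisibility-by-10000 check), keeping the same lexicographic output order.
import Mathlib
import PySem

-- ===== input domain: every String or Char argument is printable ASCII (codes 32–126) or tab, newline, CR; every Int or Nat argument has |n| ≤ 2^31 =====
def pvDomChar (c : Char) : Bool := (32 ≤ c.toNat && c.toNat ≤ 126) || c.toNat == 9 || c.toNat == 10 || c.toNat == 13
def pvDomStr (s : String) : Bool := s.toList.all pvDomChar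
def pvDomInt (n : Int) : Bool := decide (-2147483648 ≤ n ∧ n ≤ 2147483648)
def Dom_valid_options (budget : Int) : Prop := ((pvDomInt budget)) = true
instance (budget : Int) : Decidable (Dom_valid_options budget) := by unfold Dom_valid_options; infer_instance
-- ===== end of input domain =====

-- B replaces A's enumeration of all 5-tuples by iterating only the first four coordinates and
-- solving the linear cost equation for the fifth coordinate (asymptotically faster).

-- ===== PORT A =====
-- helper find_cost of A, transliterated
def find_cost (combination : List (List Int)) (resource_dict : PySem.Dict String Int) : List Int :=
  let costs := resource_dict.values
  combination.map (fun comb => ((comb.zip costs).map (fun p => p.1 * p.2)).sum)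

-- int(budget/10000): Python float division then truncation toward zero; on Dom (|budget| ≤ 2^31)
-- the correctly-rounded float quotient truncates to exactly Int.tdiv budget 10000 (exact here).
def valid_options (budget : Int) : List (List Int) :=
  let resource_dict : PySem.Dict String Int :=
    ((((PySem.Dict.empty.insert "design" 40000).insert "assembly" 10000).insert
        "curing" 10000).insert "inspection" 10000).insert "shipping" 10000
  let limit := budget.tdiv 10000
  let rng := PySem.List.pyRange 0 (limit + 1) 1
  -- itertools.product(range(limit+1), repeat=5), lexicographic order
  let combinations := rng.flatMap fun a => rng.flatMap fun b => rng.flatMap fun c =>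
      rng.flatMap fun d => rng.map fun e => [a, b, c, d, e]
  let costs := find_cost combinations resource_dict
  let vo := ((combinations.zip costs).filter (fun p => p.2 == budget)).map Prod.fst
  vo.map (fun comb => comb.map (· + 1))

-- ===== PORT B =====
def valid_options_alt (budget : Int) : List (List Int) :=
  let limit := budget.tdiv 10000
  if limit < 0 ∨ PySem.Int.mod budget 10000 ≠ 0 then []
  else
    let L := PySem.Int.floordiv budget 10000
    (PySem.List.pyRange 0 (limit + 1) 1).flatMap fun a =>
    (PySem.List.pyRange 0 (limit + 1) 1).flatMap fun b =>
    (PySem.List.pyRange 0 (limit + 1) 1).flatMap fun c =>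
    (PySem.List.pyRange 0 (limit + 1) 1).flatMap fun d =>
      let e := L - 4 * a - b - c - d
      if 0 ≤ e ∧ e ≤ limit then [[a + 1, b + 1, c + 1, d + 1, e + 1]] else []

-- ===== PRECONDITION & SPEC =====
def Spec_valid_options (budget : Int) (out : List (List Int)) : Prop := out = valid_options_alt budget
instance (budget : Int) (out : List (List Int)) : Decidable (Spec_valid_options budget out) := by unfold Spec_valid_options; infer_instance

-- ===== CLAIM (what is proved, stated in full; the proofs are below) =====
def Claim_equal_valid_options : Prop := ∀ (budget : Int), Dom_valid_options budget → Spec_valid_options budget (valid_options budget)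

-- ===== LEMMAS AND PROOFS =====

lemma zip_map_filter_fst {α β : Type} (l : List α) (f : α → β) (p : β → Bool) :
    (((l.zip (l.map f)).filter (fun q => p q.2)).map Prod.fst) = l.filter (fun x => p (f x)) := by
  induction l with
  | nil => rfl
  | cons x xs ih =>
    simp only [List.map_cons, List.zip_cons_cons, List.filter_cons]
    by_cases h : p (f x) <;> simp [h, ih]

lemma filter_eq_range (n : Nat) (e0 : Int) :
    ((List.range n).map (Nat.cast : Nat → Int)).filter (fun e => e == e0)
      = if 0 ≤ e0 ∧ e0 < (n : Int) then [e0] else [] := by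
  induction n with
  | zero => simp
  | succ n ih =>
    rw [List.range_succ, List.map_append, List.filter_append, ih]
    simp only [List.map_cons, List.map_nil, List.filter_cons, List.filter_nil, beq_iff_eq]
    push_cast
    by_cases h : (n : Int) = e0
    · rw [if_neg (by omega), if_pos h, if_pos (by omega)]
      simp [h]
    · rw [if_neg h]
      by_cases h2 : 0 ≤ e0 ∧ e0 < (n : Int)
      · rw [if_pos h2, if_pos (by omega)]; simp
      · rw [if_neg h2, if_neg (by omega)]; simp

lemma flatMap_nil_fun {α β : Type} (l : List α) : l.flatMap (fun _ => ([] : List β)) = [] := by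
  induction l with
  | nil => rfl
  | cons x xs ih => simp [ih]

-- the innermost level of A (the e-loop, filtered) when the budget is the multiple 10000*limit
lemma leaf_eq (limit a b c d : Int) (hl : 0 ≤ limit) :
    List.map ((fun comb => List.map (fun x => x + 1) comb) ∘ fun e => [a, b, c, d, e])
      (List.filter ((fun x => (List.map (fun p => p.1 * p.2)
            (x.zip ([40000, 10000, 10000, 10000, 10000] : List Int))).sum == 10000 * limit) ∘
          fun e => [a, b, c, d, e])
        (PySem.List.pyRange 0 (limit + 1) 1))
    = if 0 ≤ limit - 4 * a - b - c - d ∧ limit - 4 * a - b - c - d ≤ limit then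
        [[a + 1, b + 1, c + 1, d + 1, limit - 4 * a - b - c - d + 1]] else [] := by
  rw [List.filter_congr (q := fun e => e == limit - 4 * a - b - c - d)
    (by intro x hx; simp only [Function.comp, List.zip_cons_cons, List.zip_nil_right,
          List.map_cons, List.map_nil, List.sum_cons, List.sum_nil]
        rw [Bool.eq_iff_iff]; simp only [beq_iff_eq]; omega)]
  rw [PySem.List.pyRange_one]
  simp only [zero_add, sub_zero]
  rw [filter_eq_range]
  rw [Int.toNat_of_nonneg (by omega)]
  split_ifs with h1 h2
  · simp [Function.comp]
  · omega
  · omega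
  · simp

-- the innermost level of A when 10000 does not divide the budget: nothing survives the filter
lemma leaf_nil (limit budget a b c d : Int) (h : ¬ (10000 : Int) ∣ budget) :
    List.map ((fun comb => List.map (fun x => x + 1) comb) ∘ fun e => [a, b, c, d, e])
      (List.filter ((fun x => (List.map (fun p => p.1 * p.2)
            (x.zip ([40000, 10000, 10000, 10000, 10000] : List Int))).sum == budget) ∘
          fun e => [a, b, c, d, e])
        (PySem.List.pyRange 0 (limit + 1) 1)) = [] := by
  rw [List.filter_eq_nil_iff.mpr ?_, List.map_nil]
  intro x hx
  simp only [Function.comp, List.zip_cons_cons, List.zip_nil_right, List.map_cons,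
    List.map_nil, List.sum_cons, List.sum_nil, beq_iff_eq]
  omega

theorem valid_options_eq (budget : Int) : valid_options budget = valid_options_alt budget := by
  simp only [valid_options, valid_options_alt, find_cost]
  rw [show (((((PySem.Dict.empty.insert "design" 40000).insert "assembly" 10000).insert
        "curing" 10000).insert "inspection" 10000).insert "shipping" 10000 :
        PySem.Dict String Int).values = [40000, 10000, 10000, 10000, 10000] from by decide]
  rw [zip_map_filter_fst _ _ (fun v => v == budget)]
  simp only [List.filter_flatMap, List.map_flatMap, List.filter_map, List.map_map]
  by_cases hneg : budget.tdiv 10000 < 0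
  · rw [if_pos (Or.inl hneg), PySem.List.pyRange_one_eq_nil (by omega)]
    simp
  · by_cases hmod : PySem.Int.mod budget 10000 = 0
    · have hdvd : (10000 : Int) ∣ budget := (PySem.Int.mod_eq_zero_iff_dvd budget 10000).mp hmod
      obtain ⟨k, hk⟩ := hdvd
      have htd : budget.tdiv 10000 = k := by
        rw [hk]; exact Int.mul_tdiv_cancel_left k (by norm_num)
      have hfd : PySem.Int.floordiv budget 10000 = k := by
        rw [PySem.Int.floordiv_eq_iff_of_pos (by norm_num)]
        omega
      rw [if_neg (by simp only [not_or, not_lt, ne_eq, not_not]; exact ⟨by omega, hmod⟩)]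
      rw [htd, hfd, hk]
      congr 1; funext a; congr 1; funext b; congr 1; funext c; congr 1; funext d
      exact leaf_eq k a b c d (by omega)
    · have hnd : ¬ (10000 : Int) ∣ budget := fun hd =>
        hmod ((PySem.Int.mod_eq_zero_iff_dvd budget 10000).mpr hd)
      rw [if_pos (Or.inr hmod)]
      have h4 : ∀ a b c d : Int,
          List.map ((fun comb => List.map (fun x => x + 1) comb) ∘ fun e => [a, b, c, d, e])
            (List.filter ((fun x => (List.map (fun p => p.1 * p.2)
                  (x.zip ([40000, 10000, 10000, 10000, 10000] : List Int))).sum == budget) ∘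
                fun e => [a, b, c, d, e])
              (PySem.List.pyRange 0 (budget.tdiv 10000 + 1) 1)) = [] :=
        fun a b c d => leaf_nil _ _ a b c d hnd
      simp only [h4, flatMap_nil_fun]

-- ===== VERDICT (by name: the statement is the Claim_ definition above) =====
theorem valid_options_spec : Claim_equal_valid_options := by
  intro budget _
  unfold Spec_valid_options
  exact valid_options_eq budget
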